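-- pv_equiv track=rewrite | github.com/Azure/Azure-Sentinel | Solutions/VMRay/Playbooks/CustomConnector/VMRayEnrichment_FunctionAppConnector/VMRayUploadSample/app.py | build_submission_data
-- ===== SOURCE A (Python) =====
-- def build_submission_data(data):
--     """Process a submission response from VMRay Platform
--
--     Args:
--         data: (dict): submission response
--     """
--     jobs_list = []
--     jobs = data.get("jobs", [])
--     for job in jobs:
--         if isinstance(job, dict):
--             job_entry = {
--                 "JobID": job.get("job_id"),
--                 "Created": job.get("job_created"),
--                 "SampleID": job.get("job_sample_id"),
--                 "VMName": job.get("job_vm_name"),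
--                 "VMID": job.get("job_vm_id"),
--                 "JobRuleSampleType": job.get("job_jobrule_sampletype"),
--             }
--             jobs_list.append(job_entry)
--
--     samples_list = []
--     samples = data.get("samples", [])
--     for sample in samples:
--         if isinstance(sample, dict):
--             sample_entry = {
--                 "SampleID": sample.get("sample_id"),
--                 "SampleURL": sample.get("sample_webif_url"),
--                 "Created": sample.get("sample_created"),
--                 "FileName": sample.get("submission_filename"),
--                 "FileSize": sample.get("sample_filesize"),
--                 "SSDeep": sample.get("sample_ssdeephash"),
--                 "SHA1": sample.get("sample_sha1hash"),
--             }
--             samples_list.append(sample_entry)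
--
--     submissions_list = []
--     submissions = data.get("submissions", [])
--     for submission in submissions:
--         if isinstance(submission, dict):
--             submission_entry = {
--                 "SubmissionID": submission.get("submission_id"),
--                 "SubmissionURL": submission.get("submission_webif_url"),
--                 "SampleID": submission.get("submission_sample_id"),
--             }
--             submissions_list.append(submission_entry)
--
--     entry_context = {}
--     entry_context["vmray_job"] = jobs_list
--     entry_context["vmray_sample"] = samples_list
--     entry_context["vmray_submission"] = submissions_list
--
--     return entry_context
-- ===== SOURCE B (Python) =====
-- _JOB_FIELDS = [
--     ("JobID", "job_id"),
--     ("Created", "job_created"),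
--     ("SampleID", "job_sample_id"),
--     ("VMName", "job_vm_name"),
--     ("VMID", "job_vm_id"),
--     ("JobRuleSampleType", "job_jobrule_sampletype"),
-- ]
-- _SAMPLE_FIELDS = [
--     ("SampleID", "sample_id"),
--     ("SampleURL", "sample_webif_url"),
--     ("Created", "sample_created"),
--     ("FileName", "submission_filename"),
--     ("FileSize", "sample_filesize"),
--     ("SSDeep", "sample_ssdeephash"),
--     ("SHA1", "sample_sha1hash"),
-- ]
-- _SUB_FIELDS = [
--     ("SubmissionID", "submission_id"),
--     ("SubmissionURL", "submission_webif_url"),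
--     ("SampleID", "submission_sample_id"),
-- ]
--
--
-- def _reshape(items, fields):
--     """Inverted routing: instead of probing each wanted source key in the item,
--     scan the item's own entries once and route each through a reverse
--     source->output map into a None-preinitialized entry."""
--     rev = {src: out for out, src in fields}
--     blank = dict.fromkeys(out for out, _ in fields)
--     result = []
--     for it in items:
--         if isinstance(it, dict):
--             entry = dict(blank)
--             for k, v in it.items():
--                 tgt = rev.get(k)
--                 if tgt is not None:
--                     entry[tgt] = v
--             result.append(entry)
--     return result
--
--
-- def build_submission_data(data):
--     """Process a submission response from VMRay Platform (inverted-index reshape)."""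
--     return {
--         "vmray_job": _reshape(data.get("jobs", []), _JOB_FIELDS),
--         "vmray_sample": _reshape(data.get("samples", []), _SAMPLE_FIELDS),
--         "vmray_submission": _reshape(data.get("submissions", []), _SUB_FIELDS),
--     }
-- ===== Notes on version B (the rewrite author's own statement) =====
-- stated objective: alternative
-- what changed: Instead of probing each item for every wanted source key, B builds a reverse source->output index and a None-preinitialized blank entry once per section, then scans each item's own key/value pairs a single time, routing matching pairs through the index into a copy of the blank entry.
import Mathlib
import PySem

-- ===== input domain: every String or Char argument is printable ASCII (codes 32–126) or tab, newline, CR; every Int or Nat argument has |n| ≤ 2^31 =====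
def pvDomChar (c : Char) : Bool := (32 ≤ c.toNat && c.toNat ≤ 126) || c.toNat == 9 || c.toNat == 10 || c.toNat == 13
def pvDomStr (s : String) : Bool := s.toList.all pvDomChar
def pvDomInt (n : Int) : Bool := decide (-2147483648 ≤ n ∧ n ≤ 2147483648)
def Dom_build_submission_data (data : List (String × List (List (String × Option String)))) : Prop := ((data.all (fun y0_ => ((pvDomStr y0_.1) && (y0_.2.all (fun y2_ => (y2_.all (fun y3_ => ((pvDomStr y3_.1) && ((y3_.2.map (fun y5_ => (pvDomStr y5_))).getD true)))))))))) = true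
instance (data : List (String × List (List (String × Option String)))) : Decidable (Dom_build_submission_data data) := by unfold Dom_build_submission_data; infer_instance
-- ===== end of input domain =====

-- B inverts the reshape: instead of probing each wanted source key in every item, it scans each item's
-- own entries once and routes them through a reverse source->output map into a None-preinitialized
-- entry; objective: alternative (same return value, a different traversal of the data).
-- In Lean's type every list element IS a dict, so Python's `isinstance(it, dict)` guard is always
-- true and is ported as an unconditional inclusion in both ports.

-- ===== PORT A =====
def build_submission_data (data : List (String × List (List (String × Option String)))) : List (String × List (List (String × Option String))) :=
  let d := PySem.Dict.mk data
  let jobs := d.getD "jobs" []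
  let jobs_list := jobs.foldl (fun acc job =>
    let j := PySem.Dict.mk job
    acc ++ [[("JobID", j.getD "job_id" none),
             ("Created", j.getD "job_created" none),
             ("SampleID", j.getD "job_sample_id" none),
             ("VMName", j.getD "job_vm_name" none),
             ("VMID", j.getD "job_vm_id" none),
             ("JobRuleSampleType", j.getD "job_jobrule_sampletype" none)]]) []
  let samples := d.getD "samples" []
  let samples_list := samples.foldl (fun acc sample =>
    let s := PySem.Dict.mk sample
    acc ++ [[("SampleID", s.getD "sample_id" none),
             ("SampleURL", s.getD "sample_webif_url" none),
             ("Created", s.getD "sample_created" none),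
             ("FileName", s.getD "submission_filename" none),
             ("FileSize", s.getD "sample_filesize" none),
             ("SSDeep", s.getD "sample_ssdeephash" none),
             ("SHA1", s.getD "sample_sha1hash" none)]]) []
  let submissions := d.getD "submissions" []
  let submissions_list := submissions.foldl (fun acc submission =>
    let su := PySem.Dict.mk submission
    acc ++ [[("SubmissionID", su.getD "submission_id" none),
             ("SubmissionURL", su.getD "submission_webif_url" none),
             ("SampleID", su.getD "submission_sample_id" none)]]) []
  (((PySem.Dict.empty.insert "vmray_job" jobs_list).insert
      "vmray_sample" samples_list).insert
      "vmray_submission" submissions_list).items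

-- ===== PORT B =====
def pvJobFields : List (String × String) :=
  [("JobID", "job_id"), ("Created", "job_created"), ("SampleID", "job_sample_id"),
   ("VMName", "job_vm_name"), ("VMID", "job_vm_id"),
   ("JobRuleSampleType", "job_jobrule_sampletype")]

def pvSampleFields : List (String × String) :=
  [("SampleID", "sample_id"), ("SampleURL", "sample_webif_url"), ("Created", "sample_created"),
   ("FileName", "submission_filename"), ("FileSize", "sample_filesize"),
   ("SSDeep", "sample_ssdeephash"), ("SHA1", "sample_sha1hash")]

def pvSubFields : List (String × String) :=
  [("SubmissionID", "submission_id"), ("SubmissionURL", "submission_webif_url"),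
   ("SampleID", "submission_sample_id")]

-- Python's `it.items()` iterates the dict's unique keys with their values; under the assoc-list
-- convention (lookup = first match) that is the first occurrence of each key, computed here by the
-- setdefault fold (exact: a Python dict never has duplicate keys).
def pvPyItems (it : List (String × Option String)) : List (String × Option String) :=
  (it.foldl (fun d q => d.setdefault q.1 q.2) PySem.Dict.empty).items

def pvReshape (items : List (List (String × Option String))) (fields : List (String × String)) :
    List (List (String × Option String)) :=
  let rev := PySem.Dict.mk (fields.map (fun p => (p.2, p.1)))
  let blank := PySem.Dict.mk (fields.map (fun p => (p.1, (none : Option String))))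
  items.foldl (fun result it =>
    let entry := (pvPyItems it).foldl (fun e q =>
      match rev.get? q.1 with
      | some tgt => e.insert tgt q.2
      | none => e) blank
    result ++ [entry.items]) []

def build_submission_data_alt (data : List (String × List (List (String × Option String)))) : List (String × List (List (String × Option String))) :=
  let d := PySem.Dict.mk data
  [("vmray_job", pvReshape (d.getD "jobs" []) pvJobFields),
   ("vmray_sample", pvReshape (d.getD "samples" []) pvSampleFields),
   ("vmray_submission", pvReshape (d.getD "submissions" []) pvSubFields)]

-- ===== PRECONDITION & SPEC =====
def Spec_build_submission_data (data : List (String × List (List (String × Option String)))) (out : List (String × List (List (String × Option String)))) : Prop := out = build_submission_data_alt data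
instance (data : List (String × List (List (String × Option String)))) (out : List (String × List (List (String × Option String)))) : Decidable (Spec_build_submission_data data out) := by unfold Spec_build_submission_data; infer_instance

-- ===== CLAIM (what is proved, stated in full; the proofs are below) =====
def Claim_equal_build_submission_data : Prop := ∀ (data : List (String × List (List (String × Option String)))), Dom_build_submission_data data → Spec_build_submission_data data (build_submission_data data)

-- ===== LEMMAS AND PROOFS =====
theorem pv_sd_nodup (it : List (String × Option String)) :
    ∀ (d : PySem.Dict String (Option String)), d.keys.Nodup →
      (it.foldl (fun d q => d.setdefault q.1 q.2) d).keys.Nodup := by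
  induction it with
  | nil => intro d h; simpa using h
  | cons q it ih =>
    intro d h
    simp only [List.foldl_cons]
    apply ih
    by_cases hc : d.contains q.1 = true
    · rw [PySem.Dict.setdefault_of_contains d q.2 hc]; exact h
    · rw [PySem.Dict.setdefault_of_not_contains d q.2 (by simpa using hc)]
      exact PySem.Dict.nodup_keys_insert d q.1 q.2 h

theorem pv_sd_get? (it : List (String × Option String)) :
    ∀ (d : PySem.Dict String (Option String)) (s : String),
      (it.foldl (fun d q => d.setdefault q.1 q.2) d).get? s
        = (d.get? s).or ((PySem.Dict.mk it).get? s) := by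
  induction it with
  | nil => intro d s; simp [PySem.Dict.get?]
  | cons q it ih =>
    intro d s
    simp only [List.foldl_cons, ih]
    rw [PySem.Dict.get?_mk_cons]
    by_cases hqs : q.1 = s
    · subst hqs
      by_cases hc : d.contains q.1 = true
      · rw [PySem.Dict.setdefault_of_contains d q.2 hc]
        obtain ⟨v, hv⟩ := Option.isSome_iff_exists.mp
          ((PySem.Dict.contains_eq_isSome_get? d q.1) ▸ hc)
        simp [hv]
      · rw [PySem.Dict.setdefault_of_not_contains d q.2 (by simpa using hc)]
        have hd : d.get? q.1 = none := by
          have := PySem.Dict.contains_eq_isSome_get? d q.1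
          rw [this] at hc; simpa using hc
        simp [hd]
    · by_cases hc : d.contains q.1 = true
      · rw [PySem.Dict.setdefault_of_contains d q.2 hc]
        simp [hqs]
      · rw [PySem.Dict.setdefault_of_not_contains d q.2 (by simpa using hc)]
        have hs : ¬ s = q.1 := fun h => hqs h.symm
        simp [PySem.Dict.get?_insert, hqs, hs]

theorem pv_route_fold (fields : List (String × String)) (rev : PySem.Dict String String)
    (hrev : ∀ k, rev.get? k = (fields.find? (fun p => p.2 == k)).map Prod.fst)
    (hnd : (fields.map Prod.fst).Nodup) (hns : (fields.map Prod.snd).Nodup) :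
    ∀ (ps : List (String × Option String)), (ps.map Prod.fst).Nodup →
      ∀ (g : String → Option String) (e : PySem.Dict String (Option String)),
      e.items = fields.map (fun p => (p.1, g p.2)) →
      (ps.foldl (fun e q => match rev.get? q.1 with
         | some tgt => e.insert tgt q.2
         | none => e) e).items
      = fields.map (fun p =>
          (p.1, ((ps.find? (fun q => q.1 == p.2)).map Prod.snd).getD (g p.2))) := by
  intro ps
  induction ps with
  | nil => intro _ g e he; simpa using he
  | cons q ps ih =>
    intro hp g e he
    simp only [List.foldl_cons, hrev q.1]
    rcases hf : fields.find? (fun p => p.2 == q.1) with _ | pr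
    · -- q.1 is not a source key: the entry is unchanged
      have hnotin : ∀ p ∈ fields, p.2 ≠ q.1 := by
        intro p hpmem
        have := List.find?_eq_none.mp hf p hpmem
        simpa using this
      rw [hf]
      simp only [Option.map_none]
      rw [ih (by simpa using hp.of_cons) g e he]
      apply List.map_congr_left
      intro p hpmem
      have hcond : (q.1 == p.2) = false := by
        simpa using fun h : q.1 = p.2 => hnotin p hpmem h.symm
      simp [hcond]
    · -- q.1 is the source of output pr.1
      have hprmem : pr ∈ fields := List.mem_of_find?_eq_some hf
      have hpr2 : pr.2 = q.1 := by simpa using List.find?_some hf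
      rw [hf]
      simp only [Option.map_some]
      have hinj1 := List.inj_on_of_nodup_map hnd
      have hinj2 := List.inj_on_of_nodup_map hns
      -- the updated entry corresponds to updating g at q.1
      have hcont : e.contains pr.1 = true := by
        have : (pr.1, g pr.2) ∈ e.items := by
          rw [he]; exact List.mem_map.mpr ⟨pr, hprmem, rfl⟩
        exact List.any_eq_true.mpr ⟨_, this, by simp⟩
      have he' : (e.insert pr.1 q.2).items
          = fields.map (fun p => (p.1, if p.2 = q.1 then q.2 else g p.2)) := by
        rw [PySem.Dict.items_insert_of_contains e q.2 hcont, he, List.map_map]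
        apply List.map_congr_left
        intro p hpmem
        by_cases h1 : p.1 = pr.1
        · have : p = pr := hinj1 hpmem hprmem h1
          subst this
          simp [hpr2]
        · have h2 : ¬ p.2 = q.1 := by
            intro h2
            exact h1 (congrArg Prod.fst (hinj2 hpmem hprmem (h2.trans hpr2.symm)))
          simp [h1, h2]
      rw [ih (by simpa using hp.of_cons) (fun s => if s = q.1 then q.2 else g s) _ he']
      apply List.map_congr_left
      intro p hpmem
      by_cases hq : p.2 = q.1
      · have hcond : (q.1 == p.2) = true := by simpa using hq.symm
        have hnone : ps.find? (fun r => r.1 == p.2) = none := by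
          apply List.find?_eq_none.mpr
          intro r hr hbeq
          have hr1 : r.1 = p.2 := by simpa using hbeq
          have : q.1 ∈ ps.map Prod.fst := List.mem_map.mpr ⟨r, hr, hr1.trans hq⟩
          exact (List.nodup_cons.mp (by simpa using hp)).1 this
        rw [hq] at hnone
        simp [hnone, hq]
      · have hcond : (q.1 == p.2) = false := by
          simpa using fun h : q.1 = p.2 => hq h.symm
        simp [hcond, hq]

theorem pv_rev_get? (fields : List (String × String)) (k : String) :
    (PySem.Dict.mk (fields.map (fun p => (p.2, p.1)))).get? k
      = (fields.find? (fun p => p.2 == k)).map Prod.fst := by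
  induction fields with
  | nil => rfl
  | cons f fs ih =>
    simp only [List.map_cons, PySem.Dict.get?_mk_cons, List.find?_cons]
    cases h : (f.2 == k)
    · simp [ih]
    · simp

theorem pv_route_eq (fields : List (String × String))
    (hnd : (fields.map Prod.fst).Nodup) (hns : (fields.map Prod.snd).Nodup)
    (it : List (String × Option String)) :
    ((pvPyItems it).foldl (fun e q =>
        match (PySem.Dict.mk (fields.map (fun p => (p.2, p.1)))).get? q.1 with
        | some tgt => e.insert tgt q.2
        | none => e)
      (PySem.Dict.mk (fields.map (fun p => (p.1, (none : Option String)))))).items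
      = fields.map (fun p => (p.1, (PySem.Dict.mk it).getD p.2 none)) := by
  have hnodup : ((pvPyItems it).map Prod.fst).Nodup :=
    pv_sd_nodup it PySem.Dict.empty PySem.Dict.nodup_keys_empty
  rw [pv_route_fold fields _ (pv_rev_get? fields) hnd hns (pvPyItems it) hnodup
      (fun _ => none) _ rfl]
  apply List.map_congr_left
  intro p _
  have h1 : ((pvPyItems it).find? (fun q => q.1 == p.2)).map Prod.snd
      = (it.foldl (fun d q => d.setdefault q.1 q.2) PySem.Dict.empty).get? p.2 := rfl
  rw [h1, pv_sd_get? it PySem.Dict.empty p.2, PySem.Dict.get?_empty, Option.none_or,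
      PySem.Dict.getD_eq_get?_getD]

theorem pv_items3 (x y z : List (List (String × Option String))) :
    (((PySem.Dict.empty.insert "vmray_job" x).insert "vmray_sample" y).insert
        "vmray_submission" z).items
      = [("vmray_job", x), ("vmray_sample", y), ("vmray_submission", z)] := rfl

-- ===== VERDICT (by name: the statement is the Claim_ definition above) =====
theorem build_submission_data_spec : Claim_equal_build_submission_data := by
  intro data _
  unfold Spec_build_submission_data build_submission_data build_submission_data_alt pvReshape
  simp only [PySem.List.foldl_append_singleton_eq_map, List.nil_append, pv_items3]
  refine congrArg₂ _ (congrArg _ ?_) (congrArg₂ _ (congrArg _ ?_) (congrArg₂ _ (congrArg _ ?_) rfl))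
  · exact List.map_congr_left (fun job _ => by
      rw [pv_route_eq pvJobFields (by decide) (by decide) job]; rfl)
  · exact List.map_congr_left (fun s _ => by
      rw [pv_route_eq pvSampleFields (by decide) (by decide) s]; rfl)
  · exact List.map_congr_left (fun su _ => by
      rw [pv_route_eq pvSubFields (by decide) (by decide) su]; rfl)
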